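-- pv_equiv track=rewrite | github.com/Weston-Tyler/SEER | load_janes_data.py | unconvert_predicate_name
-- ===== SOURCE A (Python) =====
-- def unconvert_predicate_name(p: str) -> str:
--     '''
--     converts from Entanglement's required hyphen-delimited predicate name to a
--     camelCase predicate from the Jane's ontology
--     '''
--     new = []
--     to_upper = False
--     for char in p:
--         if char == '-':
--             to_upper = True
--             continue
--         if to_upper:
--             char = char.upper()
--             to_upper = False
--
--         new.append(char)
--     return ''.join(new)
-- ===== SOURCE B (Python) =====
-- def unconvert_predicate_name(p: str) -> str:
--     '''
--     converts from Entanglement's required hyphen-delimited predicate name to a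
--     camelCase predicate from the Jane's ontology
--     '''
--     parts = p.split('-')
--     return parts[0] + ''.join(s[:1].upper() + s[1:] for s in parts[1:])
-- ===== Notes on version B (the rewrite author's own statement) =====
-- stated objective: idiomatic
-- what changed: B tokenizes the name with p.split('-') and uppercases only the first character of each segment after the first, instead of A's char-by-char loop carrying a to_upper flag.
import Mathlib
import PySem

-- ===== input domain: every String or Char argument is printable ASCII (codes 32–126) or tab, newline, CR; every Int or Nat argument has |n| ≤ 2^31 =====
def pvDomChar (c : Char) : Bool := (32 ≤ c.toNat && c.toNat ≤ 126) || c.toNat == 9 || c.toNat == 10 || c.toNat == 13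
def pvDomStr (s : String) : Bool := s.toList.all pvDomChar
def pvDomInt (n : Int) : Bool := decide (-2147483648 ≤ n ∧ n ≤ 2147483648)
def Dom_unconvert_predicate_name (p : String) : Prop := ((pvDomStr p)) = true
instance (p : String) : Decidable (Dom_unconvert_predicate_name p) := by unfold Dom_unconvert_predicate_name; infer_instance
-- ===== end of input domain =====

-- B replaces A's character loop with a split('-') and per-segment first-char uppercasing (idiomatic decomposition, same cost).

-- ===== PORT A =====
-- A's loop body: append char (uppercased if the to_upper flag is set), '-' sets the flag
def pvStepA (st : List Char × Bool) (c : Char) : List Char × Bool :=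
  if c = '-' then (st.1, true)
  else if st.2 then (st.1 ++ [PySem.Chars.upperChar c], false)
  else (st.1 ++ [c], false)

def unconvert_predicate_name (p : String) : String :=
  String.ofList (p.toList.foldl pvStepA ([], false)).1

-- ===== PORT B =====
-- s[:1].upper() + s[1:]
def pvCap (s : List Char) : List Char :=
  PySem.Chars.upper (PySem.List.slice s none (some 1)) ++ PySem.List.slice s (some 1) none

def unconvert_predicate_name_alt (p : String) : String :=
  let parts := List.splitOn '-' p.toList   -- p.split('-'); exact for a one-char separator
  String.ofList (parts.headD [] ++ ((parts.drop 1).map pvCap).flatten)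

-- ===== PRECONDITION & SPEC =====
def Spec_unconvert_predicate_name (p : String) (out : String) : Prop := out = unconvert_predicate_name_alt p
instance (p : String) (out : String) : Decidable (Spec_unconvert_predicate_name p out) := by unfold Spec_unconvert_predicate_name; infer_instance

-- ===== CLAIM (what is proved, stated in full; the proofs are below) =====
def Claim_equal_unconvert_predicate_name : Prop := ∀ (p : String), Dom_unconvert_predicate_name p → Spec_unconvert_predicate_name p (unconvert_predicate_name p)

-- ===== LEMMAS AND PROOFS =====

-- recursive view of A's loop output (for flag value b)
def pvBody : List Char → Bool → List Char
  | [], _ => []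
  | c :: cs, b =>
    if c = '-' then pvBody cs true
    else (if b then PySem.Chars.upperChar c else c) :: pvBody cs false

lemma pvFoldl_eq (cs : List Char) : ∀ (acc : List Char) (b : Bool),
    (cs.foldl pvStepA (acc, b)).1 = acc ++ pvBody cs b := by
  induction cs with
  | nil => intro acc b; simp [pvBody]
  | cons c cs ih =>
    intro acc b
    by_cases hc : c = '-'
    · simp [pvStepA, hc, pvBody, ih]
    · cases b <;> simp [pvStepA, hc, pvBody, ih]

lemma pvCap_nil : pvCap [] = [] := by decide

lemma pvCap_cons (c : Char) (s : List Char) :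
    pvCap (c :: s) = PySem.Chars.upperChar c :: s := by
  simp [pvCap, PySem.List.slice_to (c :: s) (by norm_num : (0:Int) ≤ 1),
        PySem.List.slice_from (c :: s) (by norm_num : (0:Int) ≤ 1), PySem.Chars.upper]

lemma pvBody_splitOn (cs : List Char) :
    pvBody cs true = ((List.splitOn '-' cs).map pvCap).flatten ∧
    pvBody cs false =
      (List.splitOn '-' cs).headD [] ++ (((List.splitOn '-' cs).drop 1).map pvCap).flatten := by
  induction cs with
  | nil => constructor <;> decide
  | cons c cs ih =>
    obtain ⟨iht, ihf⟩ := ih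
    by_cases hc : c = '-'
    · subst hc
      have hsp : List.splitOn '-' ('-' :: cs) = [] :: List.splitOn '-' cs := by
        simp [List.splitOn, List.splitOnP_cons]
      constructor <;> simp [pvBody, hsp, pvCap_nil, iht]
    · obtain ⟨h, t, hht⟩ : ∃ h t, List.splitOn '-' cs = h :: t := by
        cases hsp : List.splitOn '-' cs with
        | nil => exact absurd hsp (List.splitOnP_ne_nil _ _)
        | cons h t => exact ⟨h, t, rfl⟩
      have hsp : List.splitOn '-' (c :: cs) = (c :: h) :: t := by
        simp only [List.splitOn] at hht ⊢
        rw [List.splitOnP_cons, hht]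
        simp [hc]
      constructor <;>
        simp [pvBody, hc, hsp, pvCap_cons, ihf, hht]

-- ===== VERDICT (by name: the statement is the Claim_ definition above) =====
theorem unconvert_predicate_name_spec : Claim_equal_unconvert_predicate_name := by
  intro p _
  show _ = _
  unfold unconvert_predicate_name unconvert_predicate_name_alt
  rw [pvFoldl_eq, (pvBody_splitOn p.toList).2]
  rfl
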